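-- pv_equiv track=rewrite | github.com/ZaytsevNS/python_codewars | 7KYU/min_min_max.py | min_min_max
-- ===== SOURCE A (Python) =====
-- def min_min_max(arr: list) -> list:
--
--     sorted_arr: list = sorted(arr)
--
--     def find_min() -> int:
--         return sorted_arr[0]
--
--     def find_max() -> int:
--         return sorted_arr[-1]
--
--     def find_min_absent() -> int:
--         return [i for i in [i for i in range(sorted_arr[0], sorted_arr[-1] + 1)] if i not in sorted_arr][0]
--
--     return [find_min(), find_min_absent(), find_max()]
-- ===== SOURCE B (Python) =====
-- def min_min_max(arr: list) -> list:
--     s: list = sorted(arr)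
--     lo, hi = s[0], s[-1]
--     gaps: list = []
--     expected = lo
--     for v in s:
--         if v > expected:
--             gaps.append(expected)
--             break
--         if v == expected:
--             expected += 1
--     return [lo, gaps[0], hi]
-- ===== Notes on version B (the rewrite author's own statement) =====
-- stated objective: faster
-- what changed: Instead of materialising the whole range [min,max] and scanning the list for membership of every value, B makes one forward pass over the sorted array with an 'expected' counter that skips duplicates and records the first value missing from the run.
import Mathlib
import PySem

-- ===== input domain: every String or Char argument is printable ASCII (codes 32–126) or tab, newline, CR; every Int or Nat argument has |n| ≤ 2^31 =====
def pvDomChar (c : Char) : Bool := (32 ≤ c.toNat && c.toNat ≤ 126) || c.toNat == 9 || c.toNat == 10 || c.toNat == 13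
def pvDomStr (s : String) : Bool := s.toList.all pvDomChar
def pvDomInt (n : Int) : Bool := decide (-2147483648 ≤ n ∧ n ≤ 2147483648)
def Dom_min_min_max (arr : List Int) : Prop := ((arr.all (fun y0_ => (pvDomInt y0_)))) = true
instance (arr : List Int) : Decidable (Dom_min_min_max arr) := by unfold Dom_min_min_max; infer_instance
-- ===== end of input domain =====

-- B replaces A's range-materialisation-plus-membership-scan gap search by a single forward pass
-- over the sorted array with an 'expected' counter (objective: faster).

-- ===== PORT A =====
def min_min_max (arr : List Int) : List Int :=
  let sorted_arr := PySem.List.sorted arr (fun x => x) false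
  let find_min := (PySem.List.pyGet? sorted_arr 0).getD 0
  let find_max := (PySem.List.pyGet? sorted_arr (-1)).getD 0
  let find_min_absent :=
    (PySem.List.pyGet?
      ((PySem.List.pyRange ((PySem.List.pyGet? sorted_arr 0).getD 0)
          ((PySem.List.pyGet? sorted_arr (-1)).getD 0 + 1) 1).filter
        (fun i => decide (i ∉ sorted_arr))) 0).getD 0
  [find_min, find_min_absent, find_max]

-- ===== PORT B =====
-- the for-loop of Source B: walk the sorted list with the expected counter, collect the first gap
def altGaps : List Int → Int → List Int
  | [], _ => []
  | v :: rest, expected =>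
    if expected < v then [expected]
    else if v = expected then altGaps rest (expected + 1)
    else altGaps rest expected

def min_min_max_alt (arr : List Int) : List Int :=
  let s := PySem.List.sorted arr (fun x => x) false
  let lo := (PySem.List.pyGet? s 0).getD 0
  let hi := (PySem.List.pyGet? s (-1)).getD 0
  let gaps := altGaps s lo
  [lo, (PySem.List.pyGet? gaps 0).getD 0, hi]

-- ===== PRECONDITION & SPEC =====
-- Pre_ excludes exactly the inputs on which A raises IndexError: the empty list, and lists whose
-- values already cover the whole interval [min,max] (the gap comprehension is then empty). B raises there too.
def Pre_min_min_max (arr : List Int) : Prop :=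
  arr ≠ [] ∧ ∃ x ∈ arr, x < (arr.max?.getD 0) ∧ x + 1 ∉ arr
instance (arr : List Int) : Decidable (Pre_min_min_max arr) := by unfold Pre_min_min_max; infer_instance
def pvWitness_min_min_max : List Int := [0, 2]

def Spec_min_min_max (arr : List Int) (out : List Int) : Prop := out = min_min_max_alt arr
instance (arr : List Int) (out : List Int) : Decidable (Spec_min_min_max arr out) := by unfold Spec_min_min_max; infer_instance

-- ===== CLAIM (what is proved, stated in full; the proofs are below) =====
def Claim_equal_min_min_max : Prop := ∀ (arr : List Int), Dom_min_min_max arr → Pre_min_min_max arr → Spec_min_min_max arr (min_min_max arr)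

-- ===== LEMMAS AND PROOFS =====

-- the last element of an ascending list bounds every element
theorem le_getLast_of_pairwise (l : List Int) (hne : l ≠ []) (hpw : l.Pairwise (· ≤ ·)) :
    ∀ z ∈ l, z ≤ l.getLast hne := by
  induction l with
  | nil => cases hne rfl
  | cons a t ih =>
    intro z hz
    cases t with
    | nil =>
      rcases List.mem_cons.mp hz with h | h
      · simp [h]
      · cases h
    | cons b u =>
      have htne : (b :: u) ≠ [] := by simp
      rw [List.getLast_cons htne]
      rcases List.mem_cons.mp hz with h | h
      · subst h
        have hlast_mem : (b :: u).getLast htne ∈ b :: u := List.getLast_mem htne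
        exact List.rel_of_pairwise_cons hpw hlast_mem
      · exact ih htne hpw.of_cons z h

-- A-side: the first element of the filtered range is the least g with p g, provided all of [a,g) fails p.
theorem filter_pyRange_head (p : Int → Bool) (b g : Int) (a : Int)
    (hag : a ≤ g) (hgb : g < b)
    (hbelow : ∀ k, a ≤ k → k < g → p k = false) (hg : p g = true) :
    (PySem.List.pyRange a b 1).filter p = g :: (PySem.List.pyRange (g + 1) b 1).filter p := by
  obtain ⟨n, hn⟩ : ∃ n : Nat, g - a = (n : Int) := ⟨(g - a).toNat, by omega⟩
  induction n generalizing a with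
  | zero =>
    have hga : a = g := by omega
    subst hga
    rw [PySem.List.pyRange_one_cons (by omega)]
    simp [List.filter, hg]
  | succ n ih =>
    have hab : a < b := by omega
    rw [PySem.List.pyRange_one_cons hab]
    have hpa : p a = false := hbelow a le_rfl (by omega)
    simp only [List.filter, hpa]
    exact ih (a + 1) (by omega) (fun k hk1 hk2 => hbelow k (by omega) hk2) (by omega)

-- B-side: the counter walk finds exactly the least gap g, given some element beyond g exists.
theorem altGaps_eq (t : List Int) (e g : Int)
    (hpw : t.Pairwise (· ≤ ·)) (heg : e ≤ g)
    (hfill : ∀ k, e ≤ k → k < g → k ∈ t) (hgt : g ∉ t)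
    (hwit : ∃ v ∈ t, g < v) :
    altGaps t e = [g] := by
  induction t generalizing e with
  | nil => obtain ⟨v, hv, _⟩ := hwit; cases hv
  | cons v rest ih =>
    have hvle : ∀ y ∈ rest, v ≤ y := fun y hy => List.rel_of_pairwise_cons hpw hy
    have hpw' : rest.Pairwise (· ≤ ·) := hpw.of_cons
    by_cases hev : e < v
    · have heq : e = g := by
        rcases lt_or_eq_of_le heg with hlt | h
        · rcases List.mem_cons.mp (hfill e le_rfl hlt) with h1 | h1
          · omega
          · exact absurd (hvle e h1) (by omega)
        · exact h
      subst heq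
      simp [altGaps, hev]
    · by_cases hve : v = e
      · have hlt : e < g := by
          rcases lt_or_eq_of_le heg with h | h
          · exact h
          · exact absurd (by rw [← h, ← hve]; exact List.mem_cons_self) hgt
        have hrec := ih (e + 1) hpw' (by omega)
          (fun k hk1 hk2 => by
            rcases List.mem_cons.mp (hfill k (by omega) hk2) with h1 | h1
            · omega
            · exact h1)
          (fun h => hgt (List.mem_cons_of_mem v h))
          (by
            obtain ⟨w, hw, hgw⟩ := hwit
            rcases List.mem_cons.mp hw with h1 | h1
            · omega
            · exact ⟨w, h1, hgw⟩)
        simp [altGaps, hve, hrec]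
      · have hvlt : v < e := by omega
        have hrec := ih e hpw' heg
          (fun k hk1 hk2 => by
            rcases List.mem_cons.mp (hfill k hk1 hk2) with h1 | h1
            · omega
            · exact h1)
          (fun h => hgt (List.mem_cons_of_mem v h))
          (by
            obtain ⟨w, hw, hgw⟩ := hwit
            rcases List.mem_cons.mp hw with h1 | h1
            · omega
            · exact ⟨w, h1, hgw⟩)
        simp [altGaps, hev, hve, hrec]

-- ===== VERDICT =====
theorem min_min_max_spec : Claim_equal_min_min_max := by
  intro arr _ hPre
  obtain ⟨hne, x, hx_mem, hx_lt, hx1⟩ := hPre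
  unfold Spec_min_min_max min_min_max min_min_max_alt
  set s := PySem.List.sorted arr (fun x => x) false with hs_def
  have hmem : ∀ y : Int, y ∈ s ↔ y ∈ arr := fun y => PySem.List.mem_sorted arr (fun x => x) false y
  have hpw : s.Pairwise (· ≤ ·) := PySem.List.sorted_pairwise arr (fun x => x)
  have hsne : s ≠ [] := by
    intro h
    apply hne
    have hperm := PySem.List.sorted_perm arr (fun x : Int => x) false
    rw [← hs_def] at hperm
    rw [h] at hperm
    exact (List.Perm.nil_eq hperm).symm
  obtain ⟨m, t, hst⟩ := List.exists_cons_of_ne_nil hsne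
  -- lo and hi
  have hlo : (PySem.List.pyGet? s 0).getD 0 = m := by rw [hst]; simp
  set M := s.getLast hsne with hM_def
  have hhi : (PySem.List.pyGet? s (-1)).getD 0 = M := by
    rw [PySem.List.pyGet?_neg_one, List.getLast?_eq_some_getLast hsne]; rfl
  have hm_mem : m ∈ s := by rw [hst]; exact List.mem_cons_self
  have hM_mem : M ∈ s := List.getLast_mem hsne
  have hm_le : ∀ y ∈ s, m ≤ y := by
    intro y hy
    rw [hst] at hy hpw
    rcases List.mem_cons.mp hy with h1 | h1
    · omega
    · exact List.rel_of_pairwise_cons hpw h1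
  have hle_M : ∀ y ∈ s, y ≤ M := by
    rw [hM_def]
    exact le_getLast_of_pairwise s hsne hpw
  -- M equals arr.max?.getD 0
  have hMmax : arr.max?.getD 0 = M := by
    obtain ⟨mx, hmx⟩ : ∃ mx, arr.max? = some mx := by
      cases hm : arr.max? with
      | none => exact absurd (List.max?_eq_none_iff.mp hm) hne
      | some a => exact ⟨a, rfl⟩
    obtain ⟨hmx_mem, hmx_ge⟩ := List.max?_eq_some_iff.mp hmx
    rw [hmx]
    have h1 : mx ≤ M := hle_M mx ((hmem mx).mpr hmx_mem)
    have h2 : M ≤ mx := hmx_ge M ((hmem M).mp hM_mem)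
    simp
    omega
  -- the least gap g
  obtain ⟨g, ⟨hgm, hg_not⟩, hg_least⟩ :=
    Int.exists_least_of_bdd (P := fun k => m ≤ k ∧ k ∉ s)
      ⟨m, fun z hz => hz.1⟩
      ⟨x + 1, by
        have : m ≤ x := hm_le x ((hmem x).mpr hx_mem)
        exact ⟨by omega, fun h => hx1 ((hmem _).mp h)⟩⟩
  have hfill : ∀ k, m ≤ k → k < g → k ∈ s := by
    intro k hk1 hk2
    by_contra hk
    exact absurd (hg_least k ⟨hk1, hk⟩) (by omega)
  have hgM : g < M := by
    have hgx : g ≤ x + 1 := by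
      apply hg_least
      have : m ≤ x := hm_le x ((hmem x).mpr hx_mem)
      exact ⟨by omega, fun h => hx1 ((hmem _).mp h)⟩
    have hxM : x + 1 ≤ M := by rw [← hMmax]; omega
    have hgne : g ≠ M := fun h => hg_not (h ▸ hM_mem)
    omega
  -- A side: the filtered range starts with g
  have hA : ((PySem.List.pyRange ((PySem.List.pyGet? s 0).getD 0)
      ((PySem.List.pyGet? s (-1)).getD 0 + 1) 1).filter (fun i => decide (i ∉ s)))
      = g :: (PySem.List.pyRange (g + 1) (M + 1) 1).filter (fun i => decide (i ∉ s)) := by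
    rw [hlo, hhi]
    exact filter_pyRange_head _ (M + 1) g m hgm (by omega)
      (fun k hk1 hk2 => by simp [hfill k hk1 hk2]) (by simp [hg_not])
  -- B side: the counter walk yields [g]
  have hB : altGaps s ((PySem.List.pyGet? s 0).getD 0) = [g] := by
    rw [hlo]
    exact altGaps_eq s m g hpw hgm hfill hg_not ⟨M, hM_mem, hgM⟩
  show [(PySem.List.pyGet? s 0).getD 0,
        (PySem.List.pyGet?
          ((PySem.List.pyRange ((PySem.List.pyGet? s 0).getD 0)
              ((PySem.List.pyGet? s (-1)).getD 0 + 1) 1).filter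
            (fun i => decide (i ∉ s))) 0).getD 0,
        (PySem.List.pyGet? s (-1)).getD 0]
      = [(PySem.List.pyGet? s 0).getD 0,
         (PySem.List.pyGet? (altGaps s ((PySem.List.pyGet? s 0).getD 0)) 0).getD 0,
         (PySem.List.pyGet? s (-1)).getD 0]
  rw [hA, hB]
  simp
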